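-- pv_equiv track=rewrite | github.com/hu-ng/EPIJudge | epi_judge_python/nearest_repeated_entries.py | find_nearest_repetition
-- ===== SOURCE A (Python) =====
-- def find_nearest_repetition(paragraph):
--     hash = {}
--     char = None
--     lowest = float("inf")
--
--     for idx, val in enumerate(paragraph):
--         if val not in hash.keys():
--             hash[val] = [float("inf"), idx]
--         else:
--             if idx - hash[val][1] < hash[val][0]:
--                 hash[val][0] = idx - hash[val][1]
--                 if idx - hash[val][1] < lowest:
--                     char = val
--                     lowest = idx - hash[val][1]
--             hash[val][1] = idx
--     return hash[char][0] if char is not None else -1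
-- ===== SOURCE B (Python) =====
-- def find_nearest_repetition(paragraph):
--     # Phase 1: group all positions of each word.
--     positions = {}
--     for idx, val in enumerate(paragraph):
--         positions.setdefault(val, []).append(idx)
--     # Phase 2: the nearest equal pair is a pair of consecutive occurrences.
--     nearest = None
--     for idxs in positions.values():
--         for a, b in zip(idxs, idxs[1:]):
--             gap = b - a
--             if nearest is None or gap < nearest:
--                 nearest = gap
--     return nearest if nearest is not None else -1
-- ===== Notes on version B (the rewrite author's own statement) =====
-- stated objective: alternative
-- what changed: A interleaves index tracking, per-word minimum and global minimum in one pass over one dict of [min_gap,last_idx] cells; B is two phases: first build a dict from each word to the list of all its positions, then scan each position list's consecutive differences for the global minimum (None sentinel instead of float('inf')).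
import Mathlib
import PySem

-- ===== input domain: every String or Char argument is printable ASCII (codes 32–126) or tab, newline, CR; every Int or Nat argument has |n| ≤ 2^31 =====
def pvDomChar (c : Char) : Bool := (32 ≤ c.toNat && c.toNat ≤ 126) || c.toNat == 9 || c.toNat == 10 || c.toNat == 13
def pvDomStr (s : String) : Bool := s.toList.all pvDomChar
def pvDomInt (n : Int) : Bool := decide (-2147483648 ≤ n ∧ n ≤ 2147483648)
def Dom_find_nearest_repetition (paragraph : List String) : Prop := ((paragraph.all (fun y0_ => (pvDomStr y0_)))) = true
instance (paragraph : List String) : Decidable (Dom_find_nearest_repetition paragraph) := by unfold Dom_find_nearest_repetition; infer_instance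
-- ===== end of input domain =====

-- B recomputes A's value by a two-phase decomposition (build a positions table, then scan each
-- occurrence list's consecutive gaps); same return value, no speed claim.

-- ===== PORT A =====
-- float('inf') appears only as a sentinel compared against / overwritten by ints: Option Int, none = inf.
def pvLtInf (g : Int) (o : Option Int) : Bool :=
  match o with | none => true | some m => decide (g < m)
def pvStepA (st : PySem.Dict String (Option Int × Int) × Option String × Option Int)
    (q : Int × String) : PySem.Dict String (Option Int × Int) × Option String × Option Int :=
  let h := st.1; let char := st.2.1; let lowest := st.2.2
  let idx := q.1; let val := q.2
  if h.contains val = false then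
    (h.insert val (none, idx), char, lowest)
  else
    let cell := h.getD val (none, 0)
    let gap := idx - cell.2
    let m' := if pvLtInf gap cell.1 then some gap else cell.1   -- hash[val][0] = gap when smaller
    let h' := h.insert val (m', idx)                            -- hash[val][1] = idx
    if pvLtInf gap cell.1 && pvLtInf gap lowest then (h', some val, some gap)
    else (h', char, lowest)

def find_nearest_repetition (paragraph : List String) : Int :=
  let st := (PySem.List.enumerate paragraph 0).foldl pvStepA (PySem.Dict.empty, none, none)
  match st.2.1 with
  | none => -1
  | some c => ((st.1.getD c (none, 0)).1).getD (-1)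
    -- hash[char][0]: when char is set this entry is always some int (proved below); default unreachable

-- ===== PORT B =====
def pvStepMin (n : Option Int) (g : Int) : Option Int :=
  match n with
  | none => some g
  | some m => if g < m then some g else n

-- inner loop: 'for a, b in zip(idxs, idxs[1:]): gap = b - a; if nearest is None or gap < nearest: nearest = gap'
def pvScanGaps (n : Option Int) (idxs : List Int) : Option Int :=
  (idxs.zip idxs.tail).foldl (fun n p => pvStepMin n (p.2 - p.1)) n

def find_nearest_repetition_alt (paragraph : List String) : Int :=
  let positions := (PySem.List.enumerate paragraph 0).foldl
      (fun d q => d.modify q.2 [] (fun l => l ++ [q.1])) PySem.Dict.empty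
  let nearest := positions.values.foldl pvScanGaps none
  match nearest with
  | none => -1
  | some g => g

-- ===== PRECONDITION & SPEC =====
def Spec_find_nearest_repetition (paragraph : List String) (out : Int) : Prop := out = find_nearest_repetition_alt paragraph
instance (paragraph : List String) (out : Int) : Decidable (Spec_find_nearest_repetition paragraph out) := by unfold Spec_find_nearest_repetition; infer_instance

-- ===== CLAIM (what is proved, stated in full; the proofs are below) =====
def Claim_equal_find_nearest_repetition : Prop := ∀ (paragraph : List String), Dom_find_nearest_repetition paragraph → Spec_find_nearest_repetition paragraph (find_nearest_repetition paragraph)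

-- ===== LEMMAS AND PROOFS =====
def pvOmin (a b : Option Int) : Option Int :=
  match a, b with
  | none, b => b
  | a, none => a
  | some x, some y => some (min x y)
def pvM (xs : List Int) : Option Int := xs.foldl pvStepMin none
lemma pvStepMin_eq_omin (n : Option Int) (g : Int) : pvStepMin n g = pvOmin n (some g) := by
  cases n with
  | none => rfl
  | some m => simp [pvStepMin, pvOmin, min_def]; split_ifs <;> simp <;> omega
lemma pvOmin_none_right (a : Option Int) : pvOmin a none = a := by cases a <;> rfl
lemma pvOmin_comm (a b : Option Int) : pvOmin a b = pvOmin b a := by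
  cases a <;> cases b <;> simp [pvOmin, min_comm]
lemma pvOmin_assoc (a b c : Option Int) : pvOmin (pvOmin a b) c = pvOmin a (pvOmin b c) := by
  cases a <;> cases b <;> cases c <;> simp [pvOmin, min_assoc]
lemma foldl_stepMin (xs : List Int) : ∀ n, xs.foldl pvStepMin n = pvOmin n (pvM xs) := by
  induction xs with
  | nil => intro n; simp [pvM, pvOmin_none_right]
  | cons x xs ih =>
    intro n
    rw [List.foldl_cons, ih, pvStepMin_eq_omin]
    have : pvM (x :: xs) = pvOmin (some x) (pvM xs) := by
      show List.foldl pvStepMin none (x :: xs) = _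
      rw [List.foldl_cons, ih]; rfl
    rw [this, pvOmin_assoc]
lemma pvM_perm {xs ys : List Int} (h : xs.Perm ys) : pvM xs = pvM ys := by
  unfold pvM
  exact @List.Perm.foldl_eq _ _ pvStepMin _ _
    ⟨fun n a b => by
      rw [pvStepMin_eq_omin, pvStepMin_eq_omin, pvStepMin_eq_omin, pvStepMin_eq_omin,
        pvOmin_assoc, pvOmin_assoc, pvOmin_comm (some a)]⟩ h none
def pvOcc (v : String) (l : List (Int × String)) : List Int :=
  (l.filter (fun q => q.2 == v)).map (·.1)
lemma pvOcc_append (u : String) (l : List (Int × String)) (i : Int) (v : String) :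
    pvOcc u (l ++ [(i, v)]) = pvOcc u l ++ (if u = v then [i] else []) := by
  by_cases h : v = u <;> simp [pvOcc, List.filter_append, h] <;> simp [Ne.symm h]
lemma pvOcc_ne_nil_iff (v : String) (l : List (Int × String)) :
    pvOcc v l ≠ [] ↔ v ∈ l.map (·.2) := by
  simp [pvOcc, List.filter_eq_nil_iff]
lemma posDict_getD (l : List (Int × String)) (d : PySem.Dict String (List Int)) (v : String) :
    (l.foldl (fun d q => d.modify q.2 [] (fun xs => xs ++ [q.1])) d).getD v [] =
      d.getD v [] ++ pvOcc v l := by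
  induction l generalizing d with
  | nil => simp [pvOcc]
  | cons q l ih =>
    rw [List.foldl_cons, ih, PySem.Dict.getD_modify]
    by_cases h : v = q.2 <;> simp [h, pvOcc, List.filter_cons] <;> simp [Ne.symm h]
lemma key_lo (m r : Option Int) (g : Int) :
    pvOmin (pvOmin m (some g)) r =
      (if pvLtInf g m && pvLtInf g (pvOmin m r) then some g else pvOmin m r) := by
  cases m <;> cases r <;> simp [pvOmin, pvLtInf, min_def] <;> split_ifs <;>
    first | rfl | omega | (congr 1; omega)
lemma pvM_append (a b : List Int) : pvM (a ++ b) = pvOmin (pvM a) (pvM b) := by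
  show List.foldl pvStepMin none (a ++ b) = _
  rw [List.foldl_append, foldl_stepMin]
  rfl
lemma zip_tail_append_singleton (xs : List Int) (y : Int) (h : xs ≠ []) :
    (xs ++ [y]).zip (xs ++ [y]).tail = xs.zip xs.tail ++ [(xs.getLast h, y)] := by
  induction xs with
  | nil => exact absurd rfl h
  | cons a xs ih =>
    cases xs with
    | nil => simp
    | cons b t =>
      have := ih (by simp)
      simp only [List.cons_append, List.zip_cons_cons, List.tail_cons] at this ⊢
      rw [this]
      simp [List.getLast]
def pvGaps (idxs : List Int) : List Int := (idxs.zip idxs.tail).map (fun p => p.2 - p.1)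
lemma pvGaps_append (xs : List Int) (y : Int) (h : xs ≠ []) :
    pvGaps (xs ++ [y]) = pvGaps xs ++ [y - xs.getLast h] := by
  simp [pvGaps, zip_tail_append_singleton xs y h]
def pvTotal (l : List (Int × String)) : Option Int :=
  pvM (((PySem.Set.ofList (l.map (·.2))).map (fun v => pvGaps (pvOcc v l))).flatten)

def pvInvA (l : List (Int × String))
    (st : PySem.Dict String (Option Int × Int) × Option String × Option Int) : Prop :=
  st.1.keys = PySem.Set.ofList (l.map (·.2)) ∧
  (∀ v (h : pvOcc v l ≠ []), st.1.getD v (none, 0) = (pvM (pvGaps (pvOcc v l)), (pvOcc v l).getLast h)) ∧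
  st.2.2 = pvTotal l ∧
  (match st.2.1 with
   | none => st.2.2 = none
   | some c => ∃ g, st.2.2 = some g ∧ ∃ h : pvOcc c l ≠ [], pvM (pvGaps (pvOcc c l)) = some g)

lemma pvLtInf_omin (g : Int) (m : Option Int) :
    (if pvLtInf g m then some g else m) = pvOmin m (some g) := by
  cases m <;> simp [pvLtInf, pvOmin, min_def] <;> split_ifs <;> first | rfl | omega | (congr 1; omega)

lemma pvOmin_of_lt (g : Int) (m : Option Int) (h : pvLtInf g m = true) :
    pvOmin m (some g) = some g := by
  cases m <;> simp [pvLtInf, pvOmin, min_def] at * <;> omega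

lemma invA_holds (l : List (Int × String)) :
    pvInvA l (l.foldl pvStepA (PySem.Dict.empty, none, none)) := by
  induction l using List.reverseRecOn with
  | nil =>
      refine ⟨rfl, ?_, rfl, rfl⟩
      intro v h
      simp [pvOcc] at h
  | append_singleton l q ih =>
      obtain ⟨i, v⟩ := q
      obtain ⟨hK, hH, hL, hC⟩ := ih
      rw [List.foldl_append, List.foldl_cons, List.foldl_nil]
      set st := l.foldl pvStepA (PySem.Dict.empty, none, none) with hst
      have hmapeq : (l ++ [(i, v)]).map (·.2) = l.map (·.2) ++ [v] := by simp
      by_cases hc : st.1.contains v = false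
      · -- first occurrence of v
        have hvkeys : v ∉ st.1.keys := by
          intro hm
          rw [← PySem.Dict.contains_iff_mem_keys] at hm
          simp [hm] at hc
        have hvmap : v ∉ l.map (·.2) := by
          rw [hK, PySem.Set.mem_ofList] at hvkeys; exact hvkeys
        have hoccv : pvOcc v l = [] := by
          by_contra h
          exact hvmap ((pvOcc_ne_nil_iff v l).1 h)
        have hKeq : PySem.Set.ofList ((l ++ [(i, v)]).map (·.2)) =
            PySem.Set.ofList (l.map (·.2)) ++ [v] := by
          rw [hmapeq, PySem.Set.ofList_append, PySem.Set.update_cons, PySem.Set.update_nil]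
          have : v ∉ PySem.Set.ofList (l.map (·.2)) := by
            rw [PySem.Set.mem_ofList]; exact hvmap
          simp [PySem.Set.add, PySem.Set.contains, this]
        have hTot : pvTotal (l ++ [(i, v)]) = pvTotal l := by
          unfold pvTotal
          rw [hKeq, List.map_append]
          have hmapsame : (PySem.Set.ofList (l.map (·.2))).map
              (fun u => pvGaps (pvOcc u (l ++ [(i, v)]))) =
              (PySem.Set.ofList (l.map (·.2))).map (fun u => pvGaps (pvOcc u l)) := by
            apply List.map_congr_left
            intro u hu
            have huv : u ≠ v := fun h => hvmap (h ▸ (PySem.Set.mem_ofList _ _).1 hu)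
            rw [pvOcc_append, if_neg huv, List.append_nil]
          rw [hmapsame]
          simp [pvOcc_append, hoccv, pvGaps]
        have h1 : (pvStepA st (i, v)).1 = st.1.insert v (none, i) := by
          simp [pvStepA, hc]
        have h2 : (pvStepA st (i, v)).2.1 = st.2.1 := by simp [pvStepA, hc]
        have h3 : (pvStepA st (i, v)).2.2 = st.2.2 := by simp [pvStepA, hc]
        unfold pvInvA
        rw [h1, h2, h3]
        refine ⟨?_, ?_, ?_, ?_⟩
        · rw [PySem.Dict.keys_insert_of_not_contains _ _ hc, hK, hKeq]
        · intro u hu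
          by_cases huv : u = v
          · subst huv
            rw [PySem.Dict.getD_insert, if_pos rfl]
            have hocq : pvOcc u (l ++ [(i, u)]) = [i] := by
              rw [pvOcc_append, if_pos rfl, hoccv]; rfl
            simp [hocq, pvGaps, pvM]
          · rw [PySem.Dict.getD_insert, if_neg huv]
            have hocq : pvOcc u (l ++ [(i, v)]) = pvOcc u l := by
              rw [pvOcc_append, if_neg huv, List.append_nil]
            have hu' : pvOcc u l ≠ [] := by rwa [hocq] at hu
            rw [hH u hu']
            congr 1 <;> simp [hocq]
        · rw [hTot]; exact hL
        · cases hch : st.2.1 with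
          | none => rw [hch] at hC; exact hC
          | some c =>
            rw [hch] at hC
            obtain ⟨g, hg, hne, hM⟩ := hC
            have hcv : c ≠ v := by
              intro h; subst h
              exact hvmap ((pvOcc_ne_nil_iff c l).1 hne)
            have hocq : pvOcc c (l ++ [(i, v)]) = pvOcc c l := by
              rw [pvOcc_append, if_neg hcv, List.append_nil]
            exact ⟨g, hg, by rw [hocq]; exact hne, by rw [hocq]; exact hM⟩
      · -- v seen before
        have hc' : st.1.contains v = true := by
          cases h : st.1.contains v with
          | false => exact absurd h hc
          | true => rfl
        have hvkeys : v ∈ st.1.keys := (PySem.Dict.contains_iff_mem_keys _ _).1 hc'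
        have hvmap : v ∈ l.map (·.2) := by rwa [hK, PySem.Set.mem_ofList] at hvkeys
        have hoccv : pvOcc v l ≠ [] := (pvOcc_ne_nil_iff v l).2 hvmap
        have hcell := hH v hoccv
        set m := pvM (pvGaps (pvOcc v l)) with hm
        set lastv := (pvOcc v l).getLast hoccv with hlastv
        have hoccv' : pvOcc v (l ++ [(i, v)]) = pvOcc v l ++ [i] := by
          rw [pvOcc_append, if_pos rfl]
        have hMnew : pvM (pvGaps (pvOcc v (l ++ [(i, v)]))) = pvOmin m (some (i - lastv)) := by
          rw [hoccv', pvGaps_append _ _ hoccv, pvM_append]; rfl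
        have hKeq : PySem.Set.ofList ((l ++ [(i, v)]).map (·.2)) =
            PySem.Set.ofList (l.map (·.2)) := by
          rw [hmapeq, PySem.Set.ofList_append, PySem.Set.update_cons, PySem.Set.update_nil]
          have : v ∈ PySem.Set.ofList (l.map (·.2)) := by rw [PySem.Set.mem_ofList]; exact hvmap
          simp [PySem.Set.add, PySem.Set.contains, this]
        have hnodup : st.1.keys.Nodup := by rw [hK]; exact PySem.Set.nodup_ofList _
        have hperm : st.1.keys.Perm (v :: st.1.keys.erase v) := List.perm_cons_erase hvkeys
        have hRold : ∀ (f : String → List Int),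
            pvM ((st.1.keys.map f).flatten) =
              pvOmin (pvM (f v)) (pvM (((st.1.keys.erase v).map f).flatten)) := by
          intro f
          rw [pvM_perm ((hperm.map f).flatten), List.map_cons, List.flatten_cons, pvM_append]
        have hRsame : ((st.1.keys.erase v).map (fun u => pvGaps (pvOcc u (l ++ [(i, v)])))) =
            ((st.1.keys.erase v).map (fun u => pvGaps (pvOcc u l))) := by
          apply List.map_congr_left
          intro u hu
          have huv : u ≠ v := ((hnodup.mem_erase_iff).1 hu).1
          rw [pvOcc_append, if_neg huv, List.append_nil]
        have hTotOld : pvTotal l =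
            pvOmin m (pvM (((st.1.keys.erase v).map (fun u => pvGaps (pvOcc u l))).flatten)) := by
          unfold pvTotal
          rw [← hK, hRold]
        have hTotNew : pvTotal (l ++ [(i, v)]) =
            pvOmin (pvOmin m (some (i - lastv)))
              (pvM (((st.1.keys.erase v).map (fun u => pvGaps (pvOcc u l))).flatten)) := by
          unfold pvTotal
          rw [hKeq, ← hK, hRold, hRsame, hMnew]
        have hTotStep : pvTotal (l ++ [(i, v)]) =
            (if pvLtInf (i - lastv) m && pvLtInf (i - lastv) st.2.2 then some (i - lastv)
             else st.2.2) := by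
          rw [hTotNew, key_lo, ← hTotOld, ← hL]
        have h1 : (pvStepA st (i, v)).1 =
            st.1.insert v ((if pvLtInf (i - lastv) m then some (i - lastv) else m), i) := by
          simp only [pvStepA, hc', Bool.true_eq_false, if_false, hcell]
          split <;> rfl
        have h2 : (pvStepA st (i, v)).2.1 =
            (if pvLtInf (i - lastv) m && pvLtInf (i - lastv) st.2.2 then some v else st.2.1) := by
          simp only [pvStepA, hc', Bool.true_eq_false, if_false, hcell]
          split <;> rfl
        have h3 : (pvStepA st (i, v)).2.2 =
            (if pvLtInf (i - lastv) m && pvLtInf (i - lastv) st.2.2 then some (i - lastv)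
             else st.2.2) := by
          simp only [pvStepA, hc', Bool.true_eq_false, if_false, hcell]
          split <;> rfl
        unfold pvInvA
        rw [h1, h2, h3]
        have hKgoal : (st.1.insert v
            ((if pvLtInf (i - lastv) m then some (i - lastv) else m), i)).keys =
            PySem.Set.ofList ((l ++ [(i, v)]).map (·.2)) := by
          rw [PySem.Dict.keys_insert_of_contains _ _ hc', hK, hKeq]
        have hHgoal : ∀ u (hu : pvOcc u (l ++ [(i, v)]) ≠ []),
            (st.1.insert v ((if pvLtInf (i - lastv) m then some (i - lastv) else m), i)).getD u (none, 0) =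
              (pvM (pvGaps (pvOcc u (l ++ [(i, v)]))), (pvOcc u (l ++ [(i, v)])).getLast hu) := by
          intro u hu
          by_cases huv : u = v
          · subst huv
            rw [PySem.Dict.getD_insert, if_pos rfl, hMnew, Prod.mk.injEq]
            refine ⟨pvLtInf_omin _ _, ?_⟩
            simp [hoccv']
          · rw [PySem.Dict.getD_insert, if_neg huv]
            have hocq : pvOcc u (l ++ [(i, v)]) = pvOcc u l := by
              rw [pvOcc_append, if_neg huv, List.append_nil]
            have hu' : pvOcc u l ≠ [] := by rwa [hocq] at hu
            rw [hH u hu']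
            congr 1 <;> simp [hocq]
        by_cases hcond : (pvLtInf (i - lastv) m && pvLtInf (i - lastv) st.2.2) = true
        · rw [if_pos hcond, if_pos hcond]
          obtain ⟨hb1, hb2⟩ := Bool.and_eq_true_iff.1 hcond
          refine ⟨hKgoal, hHgoal, ?_, ?_⟩
          · rw [hTotStep, if_pos hcond]
          · refine ⟨i - lastv, rfl, ?_⟩
            have hne : pvOcc v (l ++ [(i, v)]) ≠ [] := by rw [hoccv']; simp
            exact ⟨hne, by rw [hMnew, pvOmin_of_lt _ _ hb1]⟩
        · rw [if_neg hcond, if_neg hcond]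
          have hcondf : (pvLtInf (i - lastv) m && pvLtInf (i - lastv) st.2.2) = false := by
            simpa using hcond
          refine ⟨hKgoal, hHgoal, ?_, ?_⟩
          · rw [hTotStep, if_neg hcond]
          · cases hch : st.2.1 with
            | none => rw [hch] at hC; exact hC
            | some c =>
              rw [hch] at hC
              obtain ⟨g, hg, hne, hM⟩ := hC
              by_cases hcv : c = v
              · subst hcv
                have hmg : m = some g := by rw [hm, hM]
                have hge : ¬ (i - lastv) < g := by
                  intro hlt
                  have e1 : pvLtInf (i - lastv) m = true := by
                    rw [hmg]; simp [pvLtInf]; omega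
                  have e2 : pvLtInf (i - lastv) st.2.2 = true := by
                    rw [hg]; simp [pvLtInf]; omega
                  rw [e1, e2] at hcondf; simp at hcondf
                refine ⟨g, hg, ?_⟩
                have hne' : pvOcc c (l ++ [(i, c)]) ≠ [] := by rw [hoccv']; simp
                refine ⟨hne', ?_⟩
                rw [hMnew, hmg]
                have hmin : min g (i - lastv) = g := by rw [min_def]; split_ifs <;> omega
                simp [pvOmin, hmin]
              · have hocq : pvOcc c (l ++ [(i, v)]) = pvOcc c l := by
                  rw [pvOcc_append, if_neg hcv, List.append_nil]
                exact ⟨g, hg, by rw [hocq]; exact hne, by rw [hocq]; exact hM⟩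
lemma alt_eq_total (p : List String) :
    find_nearest_repetition_alt p =
      (match pvTotal (PySem.List.enumerate p 0) with
       | none => -1
       | some g => g) := by
  set l := PySem.List.enumerate p 0 with hl
  set positions := l.foldl (fun d q => d.modify q.2 [] (fun xs => xs ++ [q.1])) PySem.Dict.empty
    with hpos
  show (match positions.values.foldl pvScanGaps none with
        | none => (-1 : Int)
        | some g => g) = _
  have hnodup : positions.keys.Nodup := by
    rw [hpos]
    exact PySem.Dict.nodup_keys_foldl_modify_key l (·.2) [] (fun _ q xs => xs ++ [q.1]) _
      (by rw [PySem.Dict.keys_empty]; exact List.nodup_nil)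
  have hkeys : positions.keys = PySem.Set.ofList (l.map (·.2)) := by
    rw [hpos, PySem.Dict.keys_foldl_modify_key l (·.2) [] (fun _ q xs => xs ++ [q.1]),
      PySem.Dict.keys_empty, PySem.Set.update_nil_left]
  have hgetD : ∀ v, positions.getD v [] = pvOcc v l := by
    intro v
    rw [hpos, posDict_getD, PySem.Dict.getD_empty, List.nil_append]
  have hvals : positions.values = positions.keys.map (fun k => pvOcc k l) := by
    rw [PySem.Dict.values_eq_map_keys positions hnodup []]
    exact List.map_congr_left (fun k _ => hgetD k)
  have hnear : positions.values.foldl pvScanGaps none = pvTotal l := by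
    rw [hvals]
    have h1 : ∀ (n : Option Int) (k : String), pvScanGaps n (pvOcc k l) =
        (pvGaps (pvOcc k l)).foldl pvStepMin n := by
      intro n k
      show ((pvOcc k l).zip (pvOcc k l).tail).foldl (fun n p => pvStepMin n (p.2 - p.1)) n = _
      rw [pvGaps, List.foldl_map]
    calc (positions.keys.map fun k => pvOcc k l).foldl pvScanGaps none
        = positions.keys.foldl (fun n k => pvScanGaps n (pvOcc k l)) none := List.foldl_map
      _ = positions.keys.foldl (fun n k => (pvGaps (pvOcc k l)).foldl pvStepMin n) none := by
            congr 1; funext n k; exact h1 n k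
      _ = (positions.keys.map fun k => pvGaps (pvOcc k l)).foldl
            (fun n xs => xs.foldl pvStepMin n) none := List.foldl_map.symm
      _ = ((positions.keys.map fun k => pvGaps (pvOcc k l)).flatten).foldl pvStepMin none :=
            List.foldl_flatten.symm
      _ = pvTotal l := by rw [hkeys]; rfl
  rw [hnear]

lemma main_spec (p : List String) :
    find_nearest_repetition p = find_nearest_repetition_alt p := by
  rw [alt_eq_total]
  set l := PySem.List.enumerate p 0 with hl
  obtain ⟨hK, hH, hL, hC⟩ := invA_holds l
  set st := l.foldl pvStepA (PySem.Dict.empty, none, none) with hst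
  show (match st.2.1 with
        | none => (-1 : Int)
        | some c => ((st.1.getD c (none, 0)).1).getD (-1)) = _
  cases hch : st.2.1 with
  | none =>
    rw [hch] at hC
    show (-1 : Int) = _
    rw [← hL, hC]
  | some c =>
    rw [hch] at hC
    obtain ⟨g, hg, hne, hM⟩ := hC
    show ((st.1.getD c (none, 0)).1).getD (-1) = _
    rw [hH c hne, ← hL, hg, hM]
    rfl

-- ===== VERDICT (by name: the statement is the Claim_ definition above) =====
theorem find_nearest_repetition_spec : Claim_equal_find_nearest_repetition := by
  intro paragraph _
  exact main_spec paragraph
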